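-- pv_equiv track=rewrite | github.com/Togohogo1/Programming-Problems | DMOJ/DMOPC/DMPG_17_S5_Bit_Matrix.py | find
-- ===== SOURCE A (Python) =====
-- def find(gen, arr):
--     if gen == 1:
--         return arr
--
--     rev = arr[::-1]
--
--     for i in range(len(arr)):
--         arr[i] = "0" + arr[i]
--         rev[i] = "1" + rev[i]
--
--     return find(gen-1, arr+rev)
-- ===== SOURCE B (Python) =====
-- def find(gen, arr):
--     res = arr
--     for _ in range(gen - 1):
--         rev = res[::-1]
--         res = ["0" + x for x in res] + ["1" + x for x in rev]
--     return res
-- ===== Notes on version B (the rewrite author's own statement) =====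
-- stated objective: simpler
-- what changed: Replaces A's linear recursion with index-based in-place mutation by an iterative gen-1 step loop over an accumulator built from two comprehensions; B does not mutate the caller's list (A prefixes '0' to the caller's elements in place), return values are equal.
import Mathlib
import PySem

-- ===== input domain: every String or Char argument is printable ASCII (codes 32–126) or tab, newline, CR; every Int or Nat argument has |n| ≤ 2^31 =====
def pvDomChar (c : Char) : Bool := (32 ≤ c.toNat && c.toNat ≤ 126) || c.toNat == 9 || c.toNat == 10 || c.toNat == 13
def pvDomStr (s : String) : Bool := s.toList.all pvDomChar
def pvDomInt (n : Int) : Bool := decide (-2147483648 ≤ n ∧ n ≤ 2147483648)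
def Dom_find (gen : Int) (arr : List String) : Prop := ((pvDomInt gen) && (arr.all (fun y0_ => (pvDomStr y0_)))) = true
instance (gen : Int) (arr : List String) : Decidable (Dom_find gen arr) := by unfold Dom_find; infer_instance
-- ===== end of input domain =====

-- B changes the decomposition (iterative accumulator loop instead of linear recursion with
-- index mutation); equivalence is about the RETURN value only — A mutates the caller's list
-- (prefixes "0" to its elements in place), B does not.

-- ===== PORT A =====
-- the body of A's `for i in range(len(arr))`: arr[i] = "0"+arr[i]; rev[i] = "1"+rev[i]
-- (indices are always in range, so list.set / getD i "" is exact here)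
def findStep (st : List String × List String) (i : Nat) : List String × List String :=
  (st.1.set i ("0" ++ st.1.getD i ""), st.2.set i ("1" ++ st.2.getD i ""))

def find (gen : Int) (arr : List String) : List String :=
  if gen == 1 then arr
  else if _h : 1 < gen then
    -- rev = arr[::-1]; then the index loop mutating arr and rev; then recurse on arr+rev
    let p := (List.range arr.length).foldl findStep (arr, arr.reverse)
    find (gen - 1) (p.1 ++ p.2)
  else arr   -- for gen < 1 the Python A recurses forever (RecursionError); excluded by Pre_find
termination_by (gen - 1).toNat
decreasing_by omega

-- ===== PORT B =====
-- one iteration of B's loop: rev = res[::-1]; res = ["0"+x for x in res] + ["1"+x for x in rev]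
def altStep (res : List String) : List String :=
  res.map (fun x => "0" ++ x) ++ res.reverse.map (fun x => "1" ++ x)

def find_alt (gen : Int) (arr : List String) : List String :=
  (List.range (gen - 1).toNat).foldl (fun res _ => altStep res) arr

-- ===== PRECONDITION & SPEC =====
-- Pre_find excludes gen < 1, on which A recurses without a base case and raises RecursionError.
def Pre_find (gen : Int) (arr : List String) : Prop := 1 ≤ gen
instance (gen : Int) (arr : List String) : Decidable (Pre_find gen arr) := by unfold Pre_find; infer_instance

def pvWitness_find : Int × List String := (3, ["0", "1"])

def Spec_find (gen : Int) (arr : List String) (out : List String) : Prop := out = find_alt gen arr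
instance (gen : Int) (arr : List String) (out : List String) : Decidable (Spec_find gen arr out) := by unfold Spec_find; infer_instance

-- ===== CLAIM (what is proved, stated in full; the proofs are below) =====
def Claim_equal_find : Prop := ∀ (gen : Int) (arr : List String), Dom_find gen arr → Pre_find gen arr → Spec_find gen arr (find gen arr)

-- ===== LEMMAS AND PROOFS =====

-- the paired loop acts componentwise
theorem foldl_findStep (l : List Nat) (a r : List String) :
    l.foldl findStep (a, r) =
      (l.foldl (fun s i => s.set i ("0" ++ s.getD i "")) a,
       l.foldl (fun s i => s.set i ("1" ++ s.getD i "")) r) := by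
  induction l generalizing a r with
  | nil => rfl
  | cons x xs ih => simp [findStep, ih]

-- the set-loop over the first n indices prefixes c to the first n elements
theorem foldl_set_prefix (c : String) (n : Nat) (a : List String) (h : n ≤ a.length) :
    (List.range n).foldl (fun s i => s.set i (c ++ s.getD i "")) a =
      (a.take n).map (fun x => c ++ x) ++ a.drop n := by
  induction n with
  | zero => simp
  | succ n ih =>
    have hn : n ≤ a.length := Nat.le_of_succ_le h
    have hlt : n < a.length := h
    rw [List.range_succ, List.foldl_append, ih hn]
    have hlen : ((a.take n).map (fun x => c ++ x)).length = n := by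
      simp [Nat.min_eq_left hn]
    have hdrop : a.drop n = a[n] :: a.drop (n + 1) := List.drop_eq_getElem_cons hlt
    simp only [List.foldl_cons, List.foldl_nil]
    rw [hdrop]
    have hgetD : ((a.take n).map (fun x => c ++ x) ++ a[n] :: a.drop (n + 1)).getD n "" = a[n] := by
      rw [List.getD_eq_getElem?_getD, List.getElem?_append_right hlen.le, hlen]
      simp [List.getElem?_eq_getElem hlt]
    rw [hgetD, List.set_append]
    simp only [hlen, Nat.lt_irrefl, if_false, Nat.sub_self, List.set_cons_zero]
    have hmlt : n < (List.map (fun x => c ++ x) a).length := by simpa using hlt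
    have htake : List.take (n + 1) (List.map (fun x => c ++ x) a)
        = List.take n (List.map (fun x => c ++ x) a) ++ [c ++ a[n]] := by
      rw [List.take_add_one]
      simp [List.getElem?_eq_getElem hmlt]
    simp [htake]

theorem foldl_set_prefix_all (c : String) (a : List String) :
    (List.range a.length).foldl (fun s i => s.set i (c ++ s.getD i "")) a =
      a.map (fun x => c ++ x) := by
  rw [foldl_set_prefix c a.length a le_rfl]; simp

-- a fold whose step ignores the index is an iterate
theorem foldl_const_iterate (f : List String → List String) (l : List Nat) (a : List String) :
    l.foldl (fun r _ => f r) a = f^[l.length] a := by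
  induction l generalizing a with
  | nil => rfl
  | cons x xs ih => simp [ih, Function.iterate_succ_apply]

theorem find_alt_iterate (gen : Int) (arr : List String) :
    find_alt gen arr = altStep^[(gen - 1).toNat] arr := by
  rw [find_alt, foldl_const_iterate, List.length_range]

theorem find_eq_alt (gen : Int) (arr : List String) (h : 1 ≤ gen) :
    find gen arr = find_alt gen arr := by
  obtain ⟨n, hn⟩ : ∃ n : Nat, gen = 1 + n :=
    ⟨(gen - 1).toNat, by omega⟩
  subst hn
  induction n generalizing arr with
  | zero => simp [find, find_alt]
  | succ n ih =>
    have h1 : ¬ ((1 : Int) + (n + 1 : Nat) == 1) = true := by simp; omega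
    have h2 : (1 : Int) < 1 + (n + 1 : Nat) := by push_cast; omega
    rw [find]
    simp only [h1, h2, dif_pos]
    rw [foldl_findStep, foldl_set_prefix_all]
    have hrev : (List.range arr.length).foldl
        (fun s i => s.set i ("1" ++ s.getD i "")) arr.reverse
        = arr.reverse.map (fun x => "1" ++ x) := by
      have := foldl_set_prefix_all "1" arr.reverse
      simpa using this
    rw [hrev]
    have hgen : (1 : Int) + (n + 1 : Nat) - 1 = 1 + (n : Nat) := by push_cast; omega
    rw [hgen, ih (arr.map (fun x => "0" ++ x) ++ arr.reverse.map (fun x => "1" ++ x)) (by omega)]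
    rw [find_alt_iterate, find_alt_iterate]
    have ht : ((1 : Int) + (n + 1 : Nat) - 1).toNat = ((1 : Int) + (n : Nat) - 1).toNat + 1 := by omega
    rw [ht, Function.iterate_succ_apply]
    rfl

-- ===== VERDICT =====
theorem find_spec : Claim_equal_find := by
  intro gen arr _ hpre
  unfold Spec_find
  exact find_eq_alt gen arr hpre
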